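-- pv_equiv track=rewrite | github.com/Lin3141/baby-food-rag | app/graph_rag.py | _is_relevant_relation
-- ===== SOURCE A (Python) =====
-- def _is_relevant_relation(relation: str, query: str) -> bool:
--     """Determine if a graph relation is relevant to the query"""
--     relation_relevance = {
--         'iron': ['RICH_IN', 'NUTRITIONAL_ALTERNATIVE'],
--         'allergy': ['CONTAINS_ALLERGEN', 'SIMILAR_SAFETY_PROFILE'],
--         'choking': ['HAS_RISK', 'SIMILAR_SAFETY_PROFILE'],
--         'age': ['SAFE_FROM_AGE', 'SAME_AGE_GROUP'],
--         'month': ['SAFE_FROM_AGE', 'SAME_AGE_GROUP']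
--     }
--
--     for keyword, relations in relation_relevance.items():
--         if keyword in query and relation in relations:
--             return True
--     return False
-- ===== SOURCE B (Python) =====
-- # B: invert the table once into relation -> keywords and scan only that relation's keywords.
-- _RELATION_KEYWORDS = {
--     'RICH_IN': ['iron'],
--     'NUTRITIONAL_ALTERNATIVE': ['iron'],
--     'CONTAINS_ALLERGEN': ['allergy'],
--     'SIMILAR_SAFETY_PROFILE': ['allergy', 'choking'],
--     'HAS_RISK': ['choking'],
--     'SAFE_FROM_AGE': ['age', 'month'],
--     'SAME_AGE_GROUP': ['age', 'month'],
-- }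
--
-- def _is_relevant_relation(relation: str, query: str) -> bool:
--     keywords = _RELATION_KEYWORDS.get(relation)
--     if keywords is None:
--         return False
--     return any(kw in query for kw in keywords)
-- ===== Notes on version B (the rewrite author's own statement) =====
-- stated objective: idiomatic
-- what changed: B inverts the keyword->relations table into a relation->keywords dictionary, looks the relation up once, and only tests that relation's keywords for substring membership in the query, instead of A's scan over every keyword with an inner membership list.
import Mathlib
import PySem

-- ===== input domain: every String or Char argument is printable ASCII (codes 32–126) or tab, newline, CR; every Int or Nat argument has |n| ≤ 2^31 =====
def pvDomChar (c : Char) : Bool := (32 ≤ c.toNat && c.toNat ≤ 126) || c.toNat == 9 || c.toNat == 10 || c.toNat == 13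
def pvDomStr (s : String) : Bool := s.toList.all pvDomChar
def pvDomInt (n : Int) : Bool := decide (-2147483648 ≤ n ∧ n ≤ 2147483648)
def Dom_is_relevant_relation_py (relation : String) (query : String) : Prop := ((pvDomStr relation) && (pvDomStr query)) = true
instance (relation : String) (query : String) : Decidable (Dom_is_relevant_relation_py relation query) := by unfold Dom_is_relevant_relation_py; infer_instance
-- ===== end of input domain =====

-- B replaces A's scan over every keyword (with an inner relation-list membership) by a single
-- lookup in an inverted relation→keywords dictionary followed by a scan of only that relation's
-- keywords (objective: idiomatic).

-- ===== PORT A =====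
-- A's keyword → relations table, in dict insertion order
def pvRelevanceA : List (String × List String) :=
  [("iron", ["RICH_IN", "NUTRITIONAL_ALTERNATIVE"]),
   ("allergy", ["CONTAINS_ALLERGEN", "SIMILAR_SAFETY_PROFILE"]),
   ("choking", ["HAS_RISK", "SIMILAR_SAFETY_PROFILE"]),
   ("age", ["SAFE_FROM_AGE", "SAME_AGE_GROUP"]),
   ("month", ["SAFE_FROM_AGE", "SAME_AGE_GROUP"])]

-- the 'for keyword, relations in …: if keyword in query and relation in relations: return True' loop
def pvLoopA (relation : String) (query : String) : List (String × List String) → Bool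
  | [] => false
  | (kw, rels) :: rest =>
    if PySem.Str.isIn kw query && rels.contains relation then true
    else pvLoopA relation query rest

def is_relevant_relation_py (relation : String) (query : String) : Bool :=
  pvLoopA relation query pvRelevanceA

-- ===== PORT B =====
-- B's inverted relation → keywords dictionary
def pvRelationKeywordsB : PySem.Dict String (List String) :=
  PySem.Dict.mk
    [("RICH_IN", ["iron"]),
     ("NUTRITIONAL_ALTERNATIVE", ["iron"]),
     ("CONTAINS_ALLERGEN", ["allergy"]),
     ("SIMILAR_SAFETY_PROFILE", ["allergy", "choking"]),
     ("HAS_RISK", ["choking"]),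
     ("SAFE_FROM_AGE", ["age", "month"]),
     ("SAME_AGE_GROUP", ["age", "month"])]

def is_relevant_relation_py_alt (relation : String) (query : String) : Bool :=
  match PySem.Dict.get? pvRelationKeywordsB relation with
  | none => false
  | some kws => kws.any (fun kw => PySem.Str.isIn kw query)

-- ===== PRECONDITION & SPEC =====
def Spec_is_relevant_relation_py (relation : String) (query : String) (out : Bool) : Prop := out = is_relevant_relation_py_alt relation query
instance (relation : String) (query : String) (out : Bool) : Decidable (Spec_is_relevant_relation_py relation query out) := by unfold Spec_is_relevant_relation_py; infer_instance

-- ===== CLAIM (what is proved, stated in full; the proofs are below) =====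
def Claim_equal_is_relevant_relation_py : Prop := ∀ (relation : String) (query : String), Dom_is_relevant_relation_py relation query → Spec_is_relevant_relation_py relation query (is_relevant_relation_py relation query)

-- ===== LEMMAS AND PROOFS =====
set_option maxHeartbeats 1000000 in
theorem pv_equal (relation : String) (query : String) :
    is_relevant_relation_py relation query = is_relevant_relation_py_alt relation query := by
  simp only [is_relevant_relation_py, is_relevant_relation_py_alt, pvLoopA, pvRelevanceA,
    pvRelationKeywordsB, PySem.Dict.get?]
  by_cases h1 : relation = "RICH_IN" <;>
  by_cases h2 : relation = "NUTRITIONAL_ALTERNATIVE" <;>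
  by_cases h3 : relation = "CONTAINS_ALLERGEN" <;>
  by_cases h4 : relation = "SIMILAR_SAFETY_PROFILE" <;>
  by_cases h5 : relation = "HAS_RISK" <;>
  by_cases h6 : relation = "SAFE_FROM_AGE" <;>
  by_cases h7 : relation = "SAME_AGE_GROUP" <;>
  (try simp_all) <;>
  (cases hq1 : PySem.Chars.isIn ['i','r','o','n'] query.toList <;>
   cases hq2 : PySem.Chars.isIn ['a','l','l','e','r','g','y'] query.toList <;>
   cases hq3 : PySem.Chars.isIn ['c','h','o','k','i','n','g'] query.toList <;>
   cases hq4 : PySem.Chars.isIn ['a','g','e'] query.toList <;>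
   cases hq5 : PySem.Chars.isIn ['m','o','n','t','h'] query.toList <;>
   first
     | rfl
     | simp [List.find?, beq_eq_false_iff_ne.mpr (Ne.symm h1),
         beq_eq_false_iff_ne.mpr (Ne.symm h2), beq_eq_false_iff_ne.mpr (Ne.symm h3),
         beq_eq_false_iff_ne.mpr (Ne.symm h4), beq_eq_false_iff_ne.mpr (Ne.symm h5),
         beq_eq_false_iff_ne.mpr (Ne.symm h6), beq_eq_false_iff_ne.mpr (Ne.symm h7)])

-- ===== VERDICT (by name: the statement is the Claim_ definition above) =====
theorem is_relevant_relation_py_spec : Claim_equal_is_relevant_relation_py := by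
  intro relation query _
  exact pv_equal relation query
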